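-- pv_equiv track=rewrite | github.com/lojiver/algorithms | tasks/weather_randomness.py | get_weather_randomness
-- ===== SOURCE A (Python) =====
-- from typing import List
--
-- def get_weather_randomness(temperatures: List[int]) -> int:
--     if len(temperatures) == 1:
--         return 1
--
--     result = 0
--     if temperatures[0] > temperatures[1]:
--         result += 1
--     if temperatures[-1] > temperatures[-2]:
--         result += 1
--     for i in range(1, len(temperatures) - 1):
--         if temperatures[i - 1] < temperatures[i] > temperatures[i + 1]:
--             result += 1
--     return result
-- ===== SOURCE B (Python) =====
-- def get_weather_randomness(temperatures):
--     # Sign-change counting: a local maximum (with open ends) is exactly a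
--     # +/- transition in the sentinel-padded list of difference signs.
--     signs = [1]
--     for a, b in zip(temperatures, temperatures[1:]):
--         signs.append((b > a) - (b < a))
--     signs.append(-1)
--     result = 0
--     for x, y in zip(signs, signs[1:]):
--         if x > 0 and y < 0:
--             result += 1
--     return result
-- ===== Notes on version B (the rewrite author's own statement) =====
-- stated objective: alternative
-- what changed: B counts local maxima as +/- sign transitions in a sentinel-padded list of adjacent-difference signs (two staged zip passes, no index arithmetic or endpoint special cases), replacing A's len==1 early return, two endpoint checks and interior-index loop.
import Mathlib
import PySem

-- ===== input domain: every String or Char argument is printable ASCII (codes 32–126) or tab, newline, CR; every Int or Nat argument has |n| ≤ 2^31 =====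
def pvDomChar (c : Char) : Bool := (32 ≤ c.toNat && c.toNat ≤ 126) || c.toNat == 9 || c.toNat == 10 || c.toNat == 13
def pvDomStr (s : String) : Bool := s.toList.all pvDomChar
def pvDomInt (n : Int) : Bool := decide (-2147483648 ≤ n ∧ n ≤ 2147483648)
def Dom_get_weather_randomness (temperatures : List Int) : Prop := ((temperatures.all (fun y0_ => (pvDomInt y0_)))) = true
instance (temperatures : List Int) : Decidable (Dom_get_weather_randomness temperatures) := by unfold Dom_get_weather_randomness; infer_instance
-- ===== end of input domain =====

-- B counts local maxima as +/- transitions in the sentinel-padded list of difference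
-- signs instead of A's indexed endpoint/interior checks (objective: alternative).

-- ===== PORT A =====
-- indexing via pyGetD: every index A reads is in range whenever Pre_ holds (temperatures ≠ [])
def get_weather_randomness (temperatures : List Int) : Int :=
  if temperatures.length = 1 then 1
  else
    let result : Int := 0
    let result := if PySem.List.pyGetD temperatures 0 0 > PySem.List.pyGetD temperatures 1 0 then result + 1 else result
    let result := if PySem.List.pyGetD temperatures (-1) 0 > PySem.List.pyGetD temperatures (-2) 0 then result + 1 else result
    (PySem.List.pyRange 1 ((temperatures.length : Int) - 1)).foldl
      (fun r i =>
        if PySem.List.pyGetD temperatures (i - 1) 0 < PySem.List.pyGetD temperatures i 0 ∧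
           PySem.List.pyGetD temperatures i 0 > PySem.List.pyGetD temperatures (i + 1) 0
        then r + 1 else r) result

-- ===== PORT B =====
def get_weather_randomness_alt (temperatures : List Int) : Int :=
  let signs : List Int :=
    (1 :: (temperatures.zip (PySem.List.slice temperatures (some 1) none)).map
        (fun p => (if p.2 > p.1 then (1:Int) else 0) - (if p.2 < p.1 then 1 else 0))) ++ [-1]
  (signs.zip (PySem.List.slice signs (some 1) none)).foldl
    (fun r p => if p.1 > 0 ∧ p.2 < 0 then r + 1 else r) 0

-- ===== PRECONDITION & SPEC =====
-- Pre_ excludes only the empty list, on which A raises IndexError (temperatures[0]).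
def Pre_get_weather_randomness (temperatures : List Int) : Prop := temperatures ≠ []
instance (temperatures : List Int) : Decidable (Pre_get_weather_randomness temperatures) := by unfold Pre_get_weather_randomness; infer_instance
def pvWitness_get_weather_randomness : List Int := [3, 1, 4]

def Spec_get_weather_randomness (temperatures : List Int) (out : Int) : Prop := out = get_weather_randomness_alt temperatures
instance (temperatures : List Int) (out : Int) : Decidable (Spec_get_weather_randomness temperatures out) := by unfold Spec_get_weather_randomness; infer_instance

-- ===== CLAIM (what is proved, stated in full; the proofs are below) =====
def Claim_equal_get_weather_randomness : Prop := ∀ (temperatures : List Int), Dom_get_weather_randomness temperatures → Pre_get_weather_randomness temperatures → Spec_get_weather_randomness temperatures (get_weather_randomness temperatures)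

-- ===== LEMMAS AND PROOFS =====

-- 0/1 indicator of A's per-index local-max test (endpoints open)
def bInd (ts : List Int) (j : Int) : Int :=
  if (j = 0 ∨ PySem.List.pyGetD ts (j - 1) 0 < PySem.List.pyGetD ts j 0) ∧
     (j = (ts.length : Int) - 1 ∨ PySem.List.pyGetD ts j 0 > PySem.List.pyGetD ts (j + 1) 0)
  then 1 else 0

def mInd (ts : List Int) (j : Int) : Int :=
  if PySem.List.pyGetD ts (j - 1) 0 < PySem.List.pyGetD ts j 0 ∧
     PySem.List.pyGetD ts j 0 > PySem.List.pyGetD ts (j + 1) 0 then 1 else 0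

-- structural recursion 'count of +/- adjacent pairs', the shape of B's second loop
def gCount : List Int → Int
  | x :: y :: r => (if x > 0 ∧ y < 0 then 1 else 0) + gCount (y :: r)
  | _ => 0

-- recursive spec: count local maxima, the Bool says 'left side already open/rising'
def cSpec : Bool → List Int → Int
  | up, [] => if up then 0 else 0
  | up, [_] => if up then 1 else 0
  | up, x :: y :: r => (if up ∧ x > y then 1 else 0) + cSpec (decide (x < y)) (y :: r)

-- the difference-sign list of B's first loop
def dsig (ts : List Int) : List Int :=
  (ts.zip ts.tail).map (fun p => (if p.2 > p.1 then (1:Int) else 0) - (if p.2 < p.1 then 1 else 0))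

theorem fold_g (l : List Int) : ∀ (r0 : Int),
    (l.zip l.tail).foldl (fun r p => if p.1 > 0 ∧ p.2 < 0 then r + 1 else r) r0 = r0 + gCount l := by
  induction l with
  | nil => intro r0; simp [gCount]
  | cons x l ih =>
    intro r0
    cases l with
    | nil => simp [gCount]
    | cons y r =>
      simp only [List.tail_cons, List.zip_cons_cons, List.foldl_cons]
      rw [show (y :: r).zip r = (y :: r).zip ((y :: r).tail) from rfl] at *
      rw [ih]
      simp only [gCount]
      split_ifs <;> ring

theorem g_eq_c (ts : List Int) : ts ≠ [] → ∀ (s : Int),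
    gCount (s :: (dsig ts ++ [-1])) = cSpec (decide (0 < s)) ts := by
  induction ts with
  | nil => intro h; exact absurd rfl h
  | cons x l ih =>
    intro _ s
    cases l with
    | nil =>
      simp only [dsig, List.tail_cons, List.zip_nil_right, List.map_nil, List.nil_append,
        gCount, cSpec]
      split_ifs <;> simp_all <;> omega
    | cons y r =>
      have hd : dsig (x :: y :: r) =
          ((if y > x then (1:Int) else 0) - (if y < x then 1 else 0)) :: dsig (y :: r) := by
        simp [dsig]
      rw [hd]
      simp only [List.cons_append, gCount]
      rw [ih (by simp)]
      simp only [cSpec]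
      have hneg : (((if y > x then (1:Int) else 0) - (if y < x then 1 else 0)) < 0) ↔ x > y := by
        split_ifs <;> omega
      have hpos : (0 < ((if y > x then (1:Int) else 0) - (if y < x then 1 else 0))) ↔ x < y := by
        split_ifs <;> omega
      congr 1
      · by_cases hs : 0 < s <;> simp [hs, hneg]
      · congr 1
        exact Bool.decide_congr hpos

theorem alt_eq_c (ts : List Int) (h : ts ≠ []) :
    get_weather_randomness_alt ts = cSpec true ts := by
  simp only [get_weather_randomness_alt, PySem.List.slice_from_one]
  have hs : ((1 : Int) :: (ts.zip ts.tail).map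
      (fun p => (if p.2 > p.1 then (1:Int) else 0) - (if p.2 < p.1 then 1 else 0))) ++ [-1]
      = 1 :: (dsig ts ++ [-1]) := by simp [dsig]
  rw [hs, fold_g, g_eq_c ts h 1]
  simp

theorem a_eq_sum (ts : List Int) (h : ts.length ≠ 1) :
    get_weather_randomness ts =
      (if PySem.List.pyGetD ts 0 0 > PySem.List.pyGetD ts 1 0 then (1:Int) else 0) +
      (if PySem.List.pyGetD ts (-1) 0 > PySem.List.pyGetD ts (-2) 0 then (1:Int) else 0) +
      ((PySem.List.pyRange 1 ((ts.length : Int) - 1)).map (mInd ts)).sum := by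
  unfold get_weather_randomness
  rw [if_neg h]
  have : (fun (r : Int) (i : Int) =>
      if PySem.List.pyGetD ts (i - 1) 0 < PySem.List.pyGetD ts i 0 ∧
         PySem.List.pyGetD ts i 0 > PySem.List.pyGetD ts (i + 1) 0
      then r + 1 else r) = (fun r i => r + mInd ts i) := by
    funext c j; simp only [mInd]; split_ifs <;> simp
  rw [this, PySem.List.foldl_add]
  split_ifs <;> ring

theorem A_eq_sum_bInd (ts : List Int) (hne : ts ≠ []) :
    get_weather_randomness ts = ((PySem.List.pyRange 0 (ts.length : Int)).map (fun j => bInd ts j)).sum := by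
  by_cases h1 : ts.length = 1
  · obtain ⟨t, rfl⟩ := List.length_eq_one_iff.mp h1
    have hr : PySem.List.pyRange (0:Int) (1:Int) = [0] := by decide
    simp only [List.length_cons, List.length_nil, Nat.zero_add, Nat.cast_one, hr]
    simp [get_weather_randomness, bInd]
  · have hlen : 2 ≤ ts.length := by
      cases ts with
      | nil => exact absurd rfl hne
      | cons a l => cases l with
        | nil => simp at h1
        | cons b m => simp only [List.length_cons]; omega
    rw [a_eq_sum ts h1]
    rw [show PySem.List.pyRange 0 (ts.length : Int) = 0 :: PySem.List.pyRange 1 (ts.length : Int) from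
      PySem.List.pyRange_one_cons (by omega)]
    rw [show PySem.List.pyRange 1 (ts.length : Int) =
        PySem.List.pyRange 1 ((ts.length : Int) - 1) ++ [(ts.length : Int) - 1] by
      have := PySem.List.pyRange_one_succ_right (a := 1) (b := (ts.length : Int) - 1) (by omega)
      simpa using this]
    rw [List.map_cons, List.map_append, List.sum_cons, List.sum_append]
    have hmid : (PySem.List.pyRange 1 ((ts.length : Int) - 1)).map (fun j => bInd ts j) =
        (PySem.List.pyRange 1 ((ts.length : Int) - 1)).map (mInd ts) := by
      apply List.map_congr_left
      intro j hj
      have hj' := PySem.List.mem_pyRange_one.mp hj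
      simp only [bInd, mInd]
      have hjz : ¬ (j = 0) := by omega
      have hjL : ¬ (j = (ts.length : Int) - 1) := by omega
      simp_all
    rw [hmid]
    have hb0 : bInd ts 0 = (if PySem.List.pyGetD ts 0 0 > PySem.List.pyGetD ts 1 0 then (1:Int) else 0) := by
      simp only [bInd]
      have h0 : ¬ ((0:Int) = (ts.length : Int) - 1) := by omega
      simp [h0]
    have hm1 : PySem.List.pyGetD ts (-1) 0 = PySem.List.pyGetD ts ((ts.length : Int) - 1) 0 := by
      have h2 := PySem.List.pyGetD_eq_getElem (xs := ts) (i := (ts.length : Int) - 1) (d := 0)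
        (by omega) (by omega)
      rw [PySem.List.pyGetD_neg_ofNat ts 1 0 (by omega) (by omega), h2]
      congr 1
      omega
    have hm2 : PySem.List.pyGetD ts (-2) 0 = PySem.List.pyGetD ts ((ts.length : Int) - 1 - 1) 0 := by
      have h2 := PySem.List.pyGetD_eq_getElem (xs := ts) (i := (ts.length : Int) - 1 - 1) (d := 0)
        (by omega) (by omega)
      rw [PySem.List.pyGetD_neg_ofNat ts 2 0 (by omega) (by omega), h2]
      congr 1
      omega
    have hbL : bInd ts ((ts.length : Int) - 1) =
        (if PySem.List.pyGetD ts (-1) 0 > PySem.List.pyGetD ts (-2) 0 then (1:Int) else 0) := by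
      simp only [bInd]
      have hL : ¬ (((ts.length : Int) - 1) = 0) := by omega
      rw [hm1, hm2]
      simp [hL, gt_iff_lt]
    rw [hb0]
    simp only [List.map_cons, List.map_nil, List.sum_cons, List.sum_nil]
    rw [hbL]
    ring

theorem sum_bInd_eq_c (ts : List Int) : ∀ (m k : Nat), k < ts.length → ts.length - k = m →
    ((PySem.List.pyRange (k : Int) (ts.length : Int)).map (fun j => bInd ts j)).sum
      = cSpec (decide ((k : Int) = 0 ∨ PySem.List.pyGetD ts ((k : Int) - 1) 0 < PySem.List.pyGetD ts (k : Int) 0))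
          (ts.drop k) := by
  intro m
  induction m with
  | zero => intro k hk hm; omega
  | succ m ih =>
    intro k hk hm
    have hget : PySem.List.pyGetD ts (k : Int) 0 = ts[k] := by
      rw [PySem.List.pyGetD_eq_getElem (xs := ts) (d := 0) (by omega) (by exact_mod_cast hk)]
      simp
    rw [PySem.List.pyRange_one_cons (by exact_mod_cast hk), List.map_cons, List.sum_cons]
    rw [List.drop_eq_getElem_cons hk]
    by_cases hlast : k + 1 = ts.length
    · -- last element
      rw [PySem.List.pyRange_one_eq_nil (by omega), List.map_nil, List.sum_nil]
      have hdrop : ts.drop (k + 1) = [] := by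
        apply List.drop_eq_nil_of_le; omega
      rw [hdrop]
      simp only [bInd, cSpec, hget]
      have hR : (k : Int) = (ts.length : Int) - 1 := by omega
      by_cases hL : ((k : Int) = 0 ∨ PySem.List.pyGetD ts ((k : Int) - 1) 0 < ts[k])
      · rw [if_pos ⟨hL, Or.inl hR⟩]
        simp only [decide_eq_true hL, if_true]
        omega
      · rw [if_neg (by tauto)]
        simp only [decide_eq_false hL, Bool.false_eq_true, if_false]
        omega
    · -- interior element
      have hk1 : k + 1 < ts.length := by omega
      have hcast : ((k : Int) + 1) = ((k + 1 : Nat) : Int) := by push_cast; ring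
      rw [hcast, ih (k + 1) hk1 (by omega)]
      rw [List.drop_eq_getElem_cons hk1]
      have hget1 : PySem.List.pyGetD ts ((k + 1 : Nat) : Int) 0 = ts[k + 1] := by
        rw [PySem.List.pyGetD_eq_getElem (xs := ts) (d := 0) (by omega) (by exact_mod_cast hk1)]
        simp
      simp only [cSpec]
      have hup : (decide (((k + 1 : Nat) : Int) = 0 ∨
          PySem.List.pyGetD ts (((k + 1 : Nat) : Int) - 1) 0 < PySem.List.pyGetD ts ((k + 1 : Nat) : Int) 0))
          = decide (ts[k] < ts[k + 1]) := by
        have hsub : (((k + 1 : Nat) : Int) - 1) = (k : Int) := by push_cast; ring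
        have h0' : ¬((k : Int) + 1 = 0) := by omega
        rw [hsub, hget, hget1]
        simp [h0']
      rw [hup]
      congr 1
      simp only [bInd, hget]
      have hR : ¬ ((k : Int) = (ts.length : Int) - 1) := by omega
      rw [hcast, hget1]
      by_cases hL : ((k : Int) = 0 ∨ PySem.List.pyGetD ts ((k : Int) - 1) 0 < ts[k]) <;>
        by_cases hgtr : ts[k] > ts[k + 1] <;> simp [hR, hgtr]

theorem main_lemma (ts : List Int) (hne : ts ≠ []) :
    get_weather_randomness ts = get_weather_randomness_alt ts := by
  have hlen : 0 < ts.length := List.length_pos_iff.mpr hne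
  rw [A_eq_sum_bInd ts hne, alt_eq_c ts hne]
  have := sum_bInd_eq_c ts ts.length 0 hlen (by omega)
  simpa using this

-- ===== VERDICT (by name: the statement is the Claim_ definition above) =====
theorem get_weather_randomness_spec : Claim_equal_get_weather_randomness := by
  intro ts _ hpre
  unfold Spec_get_weather_randomness
  exact main_lemma ts hpre
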